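-- pv_equiv track=rewrite | github.com/fenglb/ccpnmr2.4 | python/cambridge/dangle/src/Predictor.py | collapseInto1D
-- ===== SOURCE A (Python) =====
-- BG = -1
--
-- def collapseInto1D(scoreList):
--
--   phi1D = [0] * 36
--   psi1D = [0] * 36
--
--   phi = 0
--   psi = 35
--
--   for fx in scoreList:
--
--     if (fx != BG):
--       phi1D[phi] += fx
--       psi1D[psi] += fx
--
--     phi += 1
--
--     if (phi > 35):
--       phi = 0
--       psi -= 1
--
--   return (phi1D, psi1D)
-- ===== SOURCE B (Python) =====
-- BG = -1
--
-- def collapseInto1D(scoreList):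
--     phi1D = [0] * 36
--     psi1D = [0] * 36
--     psi = 35
--     rest = scoreList
--     while rest:
--         chunk, rest = rest[:36], rest[36:]
--         total = 0
--         hit = False
--         for j, fx in enumerate(chunk):
--             if fx != BG:
--                 phi1D[j] += fx
--                 total += fx
--                 hit = True
--         if hit:
--             psi1D[psi] += total
--         psi -= 1
--     return (phi1D, psi1D)
-- ===== Notes on version B (the rewrite author's own statement) =====
-- stated objective: alternative
-- what changed: Replaces the flat element loop with its running phi/psi counters and reset branch by a structural chunked pass: the list is consumed in 36-element rows, phi is recovered as the position inside the row, and each row's non-background scores are accumulated locally and written to psi1D with a single update per contributing row.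
import Mathlib
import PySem

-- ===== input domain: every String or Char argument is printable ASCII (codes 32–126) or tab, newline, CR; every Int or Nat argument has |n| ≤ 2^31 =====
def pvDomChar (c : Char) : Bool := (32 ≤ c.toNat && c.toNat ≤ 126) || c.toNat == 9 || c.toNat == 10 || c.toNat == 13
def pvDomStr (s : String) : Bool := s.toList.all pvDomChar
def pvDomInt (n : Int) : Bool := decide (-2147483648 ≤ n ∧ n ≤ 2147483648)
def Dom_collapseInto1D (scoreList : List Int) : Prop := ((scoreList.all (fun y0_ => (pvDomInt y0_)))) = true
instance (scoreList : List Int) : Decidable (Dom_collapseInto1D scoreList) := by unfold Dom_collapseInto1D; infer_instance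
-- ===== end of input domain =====

-- B re-implements A as a structural chunked pass (one psi1D write per contributing 36-element row);
-- the equivalence is about the return value only (neither Python mutates its argument).

-- shared primitive: hand port of the Python statement `xs[i] += v` (negative-index rule via
-- PySem.List.pyIdx?; exact wherever the index is in Python range — the no-op branch is Python's
-- IndexError, which Pre_ excludes)
def pyAddAt (xs : List Int) (i : Int) (v : Int) : List Int :=
  match PySem.List.pyIdx? xs.length i with
  | some k => xs.set k (xs.getD k 0 + v)
  | none => xs

-- ===== PORT A =====
-- loop body of A's `for fx in scoreList`; state = ((phi1D, psi1D), (phi, psi))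
def AStep (st : (List Int × List Int) × (Int × Int)) (fx : Int) :
    (List Int × List Int) × (Int × Int) :=
  let phi1D := if fx ≠ -1 then pyAddAt st.1.1 st.2.1 fx else st.1.1
  let psi1D := if fx ≠ -1 then pyAddAt st.1.2 st.2.2 fx else st.1.2
  let phi := st.2.1 + 1
  if phi > 35 then ((phi1D, psi1D), (0, st.2.2 - 1)) else ((phi1D, psi1D), (phi, st.2.2))

def collapseInto1D (scoreList : List Int) : List Int × List Int :=
  (scoreList.foldl AStep ((List.replicate 36 0, List.replicate 36 0), (0, 35))).1

-- ===== PORT B =====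
-- inner `for j, fx in enumerate(chunk)` of Source B: returns (updated phi1D, total, hit)
def BInner (phi1D : List Int) (chunk : List Int) : List Int × Int × Bool :=
  (PySem.List.enumerate chunk 0).foldl
    (fun (s : List Int × Int × Bool) jf =>
      if jf.2 ≠ -1 then (pyAddAt s.1 jf.1 jf.2, s.2.1 + jf.2, true) else s) (phi1D, 0, false)

-- the `while rest:` loop of Source B
def BGo (rest phi1D psi1D : List Int) (psi : Int) : List Int × List Int :=
  if h : rest = [] then (phi1D, psi1D)
  else
    let chunk := PySem.List.slice rest none (some 36)
    let rest' := PySem.List.slice rest (some 36) none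
    let p := BInner phi1D chunk
    BGo rest' p.1 (if p.2.2 then pyAddAt psi1D psi p.2.1 else psi1D) (psi - 1)
termination_by rest.length
decreasing_by
  have hp := List.length_pos_iff.mpr h
  simp [pysem]
  omega

def collapseInto1D_alt (scoreList : List Int) : List Int × List Int :=
  BGo scoreList (List.replicate 36 0) (List.replicate 36 0) 35

-- ===== PRECONDITION & SPEC =====
-- Pre_ excludes exactly the inputs on which Python A raises IndexError: a non-background score at a
-- position ≥ 2592 = 72*36 puts psi below -36, outside Python's negative-index range (B raises there too).
def Pre_collapseInto1D (scoreList : List Int) : Prop := ∀ x ∈ scoreList.drop 2592, x = -1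
instance (scoreList : List Int) : Decidable (Pre_collapseInto1D scoreList) := by
  unfold Pre_collapseInto1D; infer_instance
def pvWitness_collapseInto1D : List Int := [5, -1, 3, 0, 7]

def Spec_collapseInto1D (scoreList : List Int) (out : List Int × List Int) : Prop := out = collapseInto1D_alt scoreList
instance (scoreList : List Int) (out : List Int × List Int) : Decidable (Spec_collapseInto1D scoreList out) := by unfold Spec_collapseInto1D; infer_instance

-- ===== CLAIM (what is proved, stated in full; the proofs are below) =====
def Claim_equal_collapseInto1D : Prop := ∀ (scoreList : List Int), Dom_collapseInto1D scoreList → Pre_collapseInto1D scoreList → Spec_collapseInto1D scoreList (collapseInto1D scoreList)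

-- ===== LEMMAS AND PROOFS =====

-- proof-side reformulations of Source B's inner loop as structural recursion on the chunk
def chunkGoA : List Int → List Int → Int → Int → List Int × Int
  | [], p, _, t => (p, t)
  | fx :: ys, p, j, t =>
    if fx ≠ -1 then chunkGoA ys (pyAddAt p j fx) (j + 1) (t + fx)
    else chunkGoA ys p (j + 1) t

def chunkGo : List Int → List Int → Int → Int → Bool → List Int × Int × Bool
  | [], p, _, t, h => (p, t, h)
  | fx :: ys, p, j, t, h =>
    if fx ≠ -1 then chunkGo ys (pyAddAt p j fx) (j + 1) (t + fx) true
    else chunkGo ys p (j + 1) t h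

theorem chunkGo_eq_chunkGoA (ys : List Int) : ∀ (p : List Int) (j t : Int) (h : Bool),
    chunkGo ys p j t h = ((chunkGoA ys p j t).1, (chunkGoA ys p j t).2,
      h || ys.any (fun x => decide (x ≠ -1))) := by
  induction ys with
  | nil => intro p j t h; simp [chunkGo, chunkGoA]
  | cons fx ys ih =>
    intro p j t h
    by_cases hfx : fx = -1 <;> simp [chunkGo, chunkGoA, hfx, ih]

theorem chunkGoA_bg (ys : List Int) : ∀ (p : List Int) (j t : Int),
    (∀ x ∈ ys, x = -1) → chunkGoA ys p j t = (p, t) := by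
  induction ys with
  | nil => intro p j t _; rfl
  | cons fx ys ih =>
    intro p j t hbg
    rw [chunkGoA, if_neg (by simp [hbg fx (by simp)])]
    exact ih p (j + 1) t (fun x hx => hbg x (by simp [hx]))

theorem pyIdx?_lt {n : Nat} {i : Int} {k : Nat} (h : PySem.List.pyIdx? n i = some k) : k < n := by
  unfold PySem.List.pyIdx? at h
  split_ifs at h <;> simp_all <;> omega

theorem length_pyAddAt (xs : List Int) (i v : Int) : (pyAddAt xs i v).length = xs.length := by
  unfold pyAddAt
  rcases hk : PySem.List.pyIdx? xs.length i with _ | k <;> simp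

theorem pyAddAt_zero (xs : List Int) (i : Int) : pyAddAt xs i 0 = xs := by
  unfold pyAddAt
  rcases hk : PySem.List.pyIdx? xs.length i with _ | k
  · rfl
  · have hl := pyIdx?_lt hk
    show xs.set k (xs.getD k 0 + 0) = xs
    rw [add_zero, List.getD_eq_getElem xs 0 hl, List.set_getElem_self hl]

theorem pyAddAt_pyAddAt (xs : List Int) (i a b : Int) :
    pyAddAt (pyAddAt xs i a) i b = pyAddAt xs i (a + b) := by
  conv_lhs => rw [pyAddAt, length_pyAddAt]
  rcases hk : PySem.List.pyIdx? xs.length i with _ | k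
  · simp [pyAddAt, hk]
  · have hl := pyIdx?_lt hk
    rw [pyAddAt, hk, pyAddAt, hk]
    simp [hl, List.set_set, add_assoc]

theorem enum_fold (ys : List Int) : ∀ (p : List Int) (t j : Int) (h : Bool),
    (PySem.List.enumerate ys j).foldl
      (fun (s : List Int × Int × Bool) jf =>
        if jf.2 ≠ -1 then (pyAddAt s.1 jf.1 jf.2, s.2.1 + jf.2, true) else s) (p, t, h) =
      chunkGo ys p j t h := by
  induction ys with
  | nil => intro p t j h; simp [PySem.List.enumerate_nil, chunkGo]
  | cons fx ys ih =>
    intro p t j h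
    rw [PySem.List.enumerate_cons, List.foldl_cons, chunkGo]
    by_cases hfx : fx = -1
    · simpa [hfx] using ih p t (j + 1) h
    · simpa [hfx] using ih (pyAddAt p j fx) (t + fx) (j + 1) true

theorem BInner_eq_chunkGo (p : List Int) (ys : List Int) :
    BInner p ys = chunkGo ys p 0 0 false := by
  unfold BInner
  exact enum_fold ys p 0 0 false

theorem chunk_fold (ys : List Int) : ∀ (p q : List Int) (t psi : Int) (phi : Nat),
    phi ≤ 35 → phi + ys.length ≤ 36 →
    ys.foldl AStep ((p, pyAddAt q psi t), ((phi : Int), psi)) =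
      (((chunkGoA ys p (phi : Int) t).1, pyAddAt q psi (chunkGoA ys p (phi : Int) t).2),
       (if phi + ys.length = 36 then ((0 : Int), psi - 1) else (((phi + ys.length : Nat) : Int), psi))) := by
  induction ys with
  | nil =>
    intro p q t psi phi h1 h2
    rw [List.foldl_nil, chunkGoA, if_neg (by simp only [List.length_nil]; omega)]
    simp
  | cons fx ys ih =>
    intro p q t psi phi h1 h2
    rw [List.foldl_cons]
    by_cases hphi : phi = 35
    · subst hphi
      have hlen2 : ys.length = 0 := by
        have h3 : (fx :: ys).length = ys.length + 1 := by simp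
        omega
      have hys : ys = [] := List.length_eq_zero_iff.mp hlen2
      subst hys
      by_cases hfx : fx = -1 <;>
        simp [AStep, chunkGoA, hfx, pyAddAt_pyAddAt]
    · have hlt : phi < 35 := lt_of_le_of_ne h1 hphi
      have hstep : AStep ((p, pyAddAt q psi t), ((phi : Int), psi)) fx =
          ((if fx ≠ -1 then pyAddAt p phi fx else p,
            pyAddAt q psi (if fx ≠ -1 then t + fx else t)), (((phi + 1 : Nat) : Int), psi)) := by
        simp only [AStep]
        rw [if_neg (by omega)]
        by_cases hfx : fx = -1 <;> simp [hfx, pyAddAt_pyAddAt]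
      rw [hstep]
      by_cases hfx : fx = -1
      · rw [chunkGoA, if_neg (by simp [hfx])]
        simp only [hfx, ne_eq, not_true_eq_false, if_false]
        rw [ih p q t psi (phi + 1) (by omega) (by simp at h2 ⊢; omega)]
        have hc : (phi + 1) + ys.length = phi + (fx :: ys).length := by simp; omega
        rw [hc]
        push_cast
        ring_nf
        simp
      · rw [chunkGoA, if_pos (by simp [hfx])]
        simp only [hfx, ne_eq, not_false_eq_true, if_true]
        rw [ih (pyAddAt p phi fx) q (t + fx) psi (phi + 1) (by omega) (by simp at h2 ⊢; omega)]
        have hc : (phi + 1) + ys.length = phi + (fx :: ys).length := by simp; omega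
        rw [hc]
        push_cast
        ring_nf

theorem main_fold (n : Nat) : ∀ (xs p q : List Int) (psi : Int), xs.length ≤ n →
    (xs.foldl AStep ((p, q), (0, psi))).1 = BGo xs p q psi := by
  induction n with
  | zero =>
    intro xs p q psi hn
    have : xs = [] := List.length_eq_zero_iff.mp (by omega)
    subst this
    rw [BGo]
    simp
  | succ n ih =>
    intro xs p q psi hn
    by_cases hxs : xs = []
    · subst hxs
      rw [BGo]
      simp
    · have hsplit : xs = xs.take 36 ++ xs.drop 36 := (List.take_append_drop 36 xs).symm
      have hlen : (xs.take 36).length ≤ 36 := by simp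
      conv_lhs => rw [hsplit, List.foldl_append, ← pyAddAt_zero q psi,
        show (0 : Int) = ((0 : Nat) : Int) from rfl]
      rw [chunk_fold (xs.take 36) p q ((0 : Nat) : Int) psi 0 (by omega) (by omega)]
      simp only [Nat.cast_zero]
      rw [BGo]
      rw [dif_neg hxs]
      rw [PySem.List.slice_to xs (by norm_num : (0:Int) ≤ 36),
        PySem.List.slice_from xs (by norm_num : (0:Int) ≤ 36),
        show ((36 : Int)).toNat = 36 from rfl]
      simp only [BInner_eq_chunkGo, chunkGo_eq_chunkGoA]
      have hQ : (if (false || (List.take 36 xs).any (fun x => decide (x ≠ -1))) = true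
            then pyAddAt q psi (chunkGoA (List.take 36 xs) p 0 0).2 else q) =
          pyAddAt q psi (chunkGoA (List.take 36 xs) p 0 0).2 := by
        by_cases hAny : (List.take 36 xs).any (fun x => decide (x ≠ -1)) = true
        · rw [hAny]; simp
        · have hbg : ∀ x ∈ List.take 36 xs, x = -1 := by
            intro x hx
            by_contra hne
            exact hAny (List.any_eq_true.mpr ⟨x, hx, by simp [hne]⟩)
          rw [chunkGoA_bg _ p 0 0 hbg]
          simp only [Bool.false_or, hAny]
          exact (pyAddAt_zero q psi).symm
      simp only [hQ]
      by_cases hfull : (xs.take 36).length = 36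
      · rw [if_pos (by omega)]
        exact ih (xs.drop 36) _ _ _ (by simp; omega)
      · have hshort : xs.length < 36 := by
          rcases lt_or_ge xs.length 36 with h | h
          · exact h
          · exact absurd (by simp [List.length_take]; omega) hfull
        have hdrop : xs.drop 36 = [] := List.drop_eq_nil_of_le (by omega)
        rw [if_neg (by omega), hdrop, List.foldl_nil, BGo]
        simp

-- ===== VERDICT (by name: the statement is the Claim_ definition above) =====
theorem collapseInto1D_spec : Claim_equal_collapseInto1D := by
  intro xs _ _
  unfold Spec_collapseInto1D collapseInto1D collapseInto1D_alt
  exact main_fold xs.length xs _ _ 35 le_rfl
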